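-- pv_equiv track=rewrite | github.com/IgorMarokhin/Basics_of_Python_S_005 | Seminar_005_Task_33.py | get_new_rating
-- ===== SOURCE A (Python) =====
-- def get_new_rating(rating, n, count=0, new_rating=None):
--     if new_rating is None:
--         new_rating = []
--     if count == n:
--         return new_rating
--     else:
--         new_rating.append(1) if rating[count] > 4 else new_rating.append(rating[count])
--     return get_new_rating(rating, n, count + 1, new_rating)
-- ===== SOURCE B (Python) =====
-- def get_new_rating(rating, n, count=0, new_rating=None):
--     out = [] if new_rating is None else new_rating
--     out.extend(1 if rating[i] > 4 else rating[i] for i in range(count, n))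
--     return out
-- ===== Notes on version B (the rewrite author's own statement) =====
-- stated objective: simpler
-- what changed: Replaces the tail recursion that rebuilds the call each step with a single extend over a generator ranging count..n-1, mapping each rating to 1 when it exceeds 4.
import Mathlib
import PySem

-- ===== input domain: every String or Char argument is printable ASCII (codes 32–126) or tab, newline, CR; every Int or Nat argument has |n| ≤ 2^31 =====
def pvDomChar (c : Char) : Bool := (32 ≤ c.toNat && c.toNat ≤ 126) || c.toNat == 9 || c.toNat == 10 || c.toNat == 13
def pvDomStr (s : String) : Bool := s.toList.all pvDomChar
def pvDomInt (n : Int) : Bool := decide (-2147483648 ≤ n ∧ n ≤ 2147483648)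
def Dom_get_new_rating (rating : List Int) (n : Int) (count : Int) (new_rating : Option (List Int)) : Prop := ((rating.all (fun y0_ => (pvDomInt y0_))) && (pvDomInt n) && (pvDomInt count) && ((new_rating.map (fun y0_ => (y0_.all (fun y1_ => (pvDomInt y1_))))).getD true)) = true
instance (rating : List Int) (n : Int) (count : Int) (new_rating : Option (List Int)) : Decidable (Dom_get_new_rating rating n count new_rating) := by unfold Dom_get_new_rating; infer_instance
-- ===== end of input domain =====

-- B replaces A's tail recursion with a single append of a map over range(count, n); objective: simpler.
-- Both programs mutate a caller-supplied new_rating in place; the equivalence proved is about the return value.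

-- ===== PORT A =====
-- A's recursion, step for step; fuel (n - count).toNat counts the remaining recursive calls
-- (on Pre_ the recursion always stops by reaching count = n, so the fuel is never exhausted early).
def pvGoA (rating : List Int) (n : Int) : Nat → Int → List Int → List Int
  | 0, _, acc => acc                              -- unreachable under Pre_ unless count = n (then A returns acc too)
  | f + 1, count, acc =>
    if count = n then acc
    else
      match PySem.List.pyGet? rating count with   -- rating[count]; none = IndexError, outside Pre_
      | none => acc
      | some r => pvGoA rating n f (count + 1) (acc ++ [if r > 4 then 1 else r])

def get_new_rating (rating : List Int) (n : Int) (count : Int) (new_rating : Option (List Int)) : List Int :=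
  let nr := new_rating.getD []                    -- if new_rating is None: new_rating = []
  if count = n then nr
  else pvGoA rating n (n - count).toNat count nr

-- ===== PORT B =====
def get_new_rating_alt (rating : List Int) (n : Int) (count : Int) (new_rating : Option (List Int)) : List Int :=
  let out := new_rating.getD []
  out ++ (PySem.List.pyRange count n 1).map
    (fun i => if PySem.List.pyGetD rating i 0 > 4 then 1 else PySem.List.pyGetD rating i 0)

-- ===== PRECONDITION & SPEC =====
-- Pre_ excludes exactly the inputs where the Python A does not return: count > n (unbounded
-- recursion, RecursionError) and indices in [count, n) outside rating's Python index range (IndexError).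
def Pre_get_new_rating (rating : List Int) (n : Int) (count : Int) (new_rating : Option (List Int)) : Prop :=
  count ≤ n ∧ (count < n → -(rating.length : Int) ≤ count ∧ n ≤ (rating.length : Int))

instance (rating : List Int) (n : Int) (count : Int) (new_rating : Option (List Int)) : Decidable (Pre_get_new_rating rating n count new_rating) := by unfold Pre_get_new_rating; infer_instance

def pvWitness_get_new_rating : List Int × Int × Int × Option (List Int) := ([3, 7, 5, 2], 4, 0, none)

def Spec_get_new_rating (rating : List Int) (n : Int) (count : Int) (new_rating : Option (List Int)) (out : List Int) : Prop := out = get_new_rating_alt rating n count new_rating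
instance (rating : List Int) (n : Int) (count : Int) (new_rating : Option (List Int)) (out : List Int) : Decidable (Spec_get_new_rating rating n count new_rating out) := by unfold Spec_get_new_rating; infer_instance

-- ===== CLAIM (what is proved, stated in full; the proofs are below) =====
def Claim_equal_get_new_rating : Prop := ∀ (rating : List Int) (n : Int) (count : Int) (new_rating : Option (List Int)), Dom_get_new_rating rating n count new_rating → Pre_get_new_rating rating n count new_rating → Spec_get_new_rating rating n count new_rating (get_new_rating rating n count new_rating)

-- ===== LEMMAS AND PROOFS =====

lemma pvGoA_eq_map (rating : List Int) (n : Int) :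
    ∀ (f : Nat) (count : Int) (acc : List Int), (n - count).toNat = f → count ≤ n →
      (count < n → -(rating.length : Int) ≤ count ∧ n ≤ (rating.length : Int)) →
      pvGoA rating n f count acc =
        acc ++ (PySem.List.pyRange count n 1).map
          (fun i => if PySem.List.pyGetD rating i 0 > 4 then 1 else PySem.List.pyGetD rating i 0) := by
  intro f
  induction f with
  | zero =>
    intro count acc hf hle _
    have : count = n := by omega
    subst this
    simp [pvGoA, PySem.List.pyRange_one_eq_nil le_rfl]
  | succ f ih =>
    intro count acc hf hle hrng
    have hlt : count < n := by omega
    have hr := hrng hlt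
    have hin : PySem.List.pyGet? rating count ≠ none := by
      intro hnone
      rw [PySem.List.pyGet?_eq_none_iff] at hnone
      exact hnone (by simp [PySem.Raise.InRange]; omega)
    obtain ⟨r, hrr⟩ := Option.ne_none_iff_exists'.mp hin
    have hd : PySem.List.pyGetD rating count 0 = r := by
      simp [PySem.List.pyGetD, hrr]
    rw [PySem.List.pyRange_one_cons hlt]
    simp only [pvGoA, if_neg (by omega : ¬ count = n), hrr, List.map_cons]
    rw [ih (count + 1) (acc ++ [if r > 4 then 1 else r]) (by omega) (by omega) (by intro _; omega)]
    simp [hd]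

-- ===== VERDICT (by name: the statement is the Claim_ definition above) =====
theorem get_new_rating_spec : Claim_equal_get_new_rating := by
  intro rating n count new_rating _ hpre
  obtain ⟨hle, hrng⟩ := hpre
  unfold Spec_get_new_rating get_new_rating get_new_rating_alt
  by_cases h : count = n
  · subst h
    simp [PySem.List.pyRange_one_eq_nil le_rfl]
  · simp only [if_neg h]
    exact pvGoA_eq_map rating n (n - count).toNat count _ rfl hle hrng
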